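-- pv_equiv track=rewrite | github.com/deepak01-Hacker/DSABusted | LeetCode/#977. Squares of a Sorted Array.py | findSeprate
-- ===== SOURCE A (Python) =====
-- def findSeprate(nums):
--     left = 0
--     right = len(nums) - 1
--
--     while(left<=right):
--         mid = (left+right)//2
--
--         if (nums[mid] >= 0 and ((mid-1 >= 0 and nums[mid-1] < 0) or (mid-1 < 0))):
--             return mid
--         elif nums[mid] >= 0 :
--             right = mid-1
--         else:
--             left = mid+1
--
--     return -1
-- ===== SOURCE B (Python) =====
-- def findSeprate(nums):
--     # Precompute the sign flags once, then do the boundary search as a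
--     # recursive helper over the flag array.
--     nonneg = [x >= 0 for x in nums]
--
--     def search(lo, hi):
--         if lo > hi:
--             return -1
--         mid = (lo + hi) // 2
--         if nonneg[mid]:
--             if mid == 0 or not nonneg[mid - 1]:
--                 return mid
--             return search(lo, mid - 1)
--         return search(mid + 1, hi)
--
--     return search(0, len(nonneg) - 1)
-- ===== Notes on version B (the rewrite author's own statement) =====
-- stated objective: alternative
-- what changed: The while-loop binary search over raw values is re-decomposed as a recursive helper over a precomputed boolean sign array, with the found-check split into a nested conditional instead of A's compound elif chain.
import Mathlib
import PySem

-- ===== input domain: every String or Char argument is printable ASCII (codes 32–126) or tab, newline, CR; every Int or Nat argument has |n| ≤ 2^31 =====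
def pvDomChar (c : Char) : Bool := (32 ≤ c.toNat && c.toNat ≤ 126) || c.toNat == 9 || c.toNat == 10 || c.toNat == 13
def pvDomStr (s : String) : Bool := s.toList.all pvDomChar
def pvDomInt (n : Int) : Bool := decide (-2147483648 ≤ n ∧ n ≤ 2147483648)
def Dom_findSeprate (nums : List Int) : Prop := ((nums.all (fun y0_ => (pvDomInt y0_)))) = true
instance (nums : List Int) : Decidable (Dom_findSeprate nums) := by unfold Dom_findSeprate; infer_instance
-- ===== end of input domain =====

-- ===== PORT A =====
-- B re-decomposes A's while-loop binary search as a recursive helper over a precomputed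
-- boolean sign array (alternative decomposition, not faster); return values agree on all inputs.

-- A's while-loop, as the obvious recursion on the (left, right) state.
def findSeprateGo (nums : List Int) (left right : Int) : Int :=
  if h : left ≤ right then
    let mid := PySem.Int.floordiv (left + right) 2
    if 0 ≤ PySem.List.pyGetD nums mid 0 ∧
        ((mid - 1 ≥ 0 ∧ PySem.List.pyGetD nums (mid - 1) 0 < 0) ∨ mid - 1 < 0) then
      mid
    else if 0 ≤ PySem.List.pyGetD nums mid 0 then
      findSeprateGo nums left (mid - 1)
    else
      findSeprateGo nums (mid + 1) right
  else
    -1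
termination_by (right + 1 - left).toNat
decreasing_by
  · have hm := PySem.Int.floordiv_two_mid_bounds (lo := left) (hi := right) h
    omega
  · have hm := PySem.Int.floordiv_two_mid_bounds (lo := left) (hi := right) h
    omega

def findSeprate (nums : List Int) : Int :=
  findSeprateGo nums 0 ((nums.length : Int) - 1)

-- ===== PORT B =====
-- Source B's recursive helper 'search' over the precomputed flag list.
def findSeprateSearch (nonneg : List Bool) (lo hi : Int) : Int :=
  if h : lo > hi then
    -1
  else
    let mid := PySem.Int.floordiv (lo + hi) 2
    if PySem.List.pyGetD nonneg mid false then
      if mid = 0 ∨ ¬ PySem.List.pyGetD nonneg (mid - 1) false then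
        mid
      else
        findSeprateSearch nonneg lo (mid - 1)
    else
      findSeprateSearch nonneg (mid + 1) hi
termination_by (hi + 1 - lo).toNat
decreasing_by
  · have hm := PySem.Int.floordiv_two_mid_bounds (lo := lo) (hi := hi) (by omega)
    omega
  · have hm := PySem.Int.floordiv_two_mid_bounds (lo := lo) (hi := hi) (by omega)
    omega

def findSeprate_alt (nums : List Int) : Int :=
  let nonneg := nums.map (fun x => decide (0 ≤ x))
  findSeprateSearch nonneg 0 ((nonneg.length : Int) - 1)

-- ===== PRECONDITION & SPEC =====
def Spec_findSeprate (nums : List Int) (out : Int) : Prop := out = findSeprate_alt nums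
instance (nums : List Int) (out : Int) : Decidable (Spec_findSeprate nums out) := by unfold Spec_findSeprate; infer_instance

-- ===== CLAIM (what is proved, stated in full; the proofs are below) =====
def Claim_equal_findSeprate : Prop := ∀ (nums : List Int), Dom_findSeprate nums → Spec_findSeprate nums (findSeprate nums)

-- ===== LEMMAS AND PROOFS =====

-- The two recursions take the same path and return the same index, for any state with
-- 0 <= left and right < length (the only states reachable from the top-level call).
theorem go_eq_search (nums : List Int) :
    ∀ (n : Nat) (l r : Int), (r + 1 - l).toNat = n → 0 ≤ l → r < (nums.length : Int) →
      findSeprateGo nums l r = findSeprateSearch (nums.map (fun x => decide (0 ≤ x))) l r := by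
  intro n
  induction n using Nat.strong_induction_on with
  | _ n ih =>
    intro l r hn hl hr
    rw [findSeprateGo, findSeprateSearch]
    by_cases hlr : l ≤ r
    · have hm := PySem.Int.floordiv_two_mid_bounds (lo := l) (hi := r) hlr
      simp only [dif_pos hlr, dif_neg (not_lt.mpr hlr)]
      set mid := PySem.Int.floordiv (l + r) 2 with hmiddef
      have h0 : 0 ≤ mid := le_trans hl hm.1
      have hlen : mid < (nums.length : Int) := lt_of_le_of_lt hm.2 hr
      have hv : PySem.List.pyGetD nums mid 0 = nums[mid.toNat] :=
        PySem.List.pyGetD_eq_getElem _ _ h0 hlen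
      have hf : PySem.List.pyGetD (nums.map (fun x => decide (0 ≤ x))) mid false
          = decide (0 ≤ nums[mid.toNat]) := by
        rw [PySem.List.pyGetD_eq_getElem _ _ h0 (by simpa using hlen)]
        simp
      rw [hv, hf]
      by_cases hvp : 0 ≤ nums[mid.toNat]
      · by_cases hz : mid = 0
        · simp only [hz, Int.toNat_zero] at hvp
          simp [hz, hvp]
        · have h1 : (0:Int) ≤ mid - 1 := by omega
          have h1len : mid - 1 < (nums.length : Int) := by omega
          have hp : PySem.List.pyGetD nums (mid - 1) 0 = nums[(mid-1).toNat] :=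
            PySem.List.pyGetD_eq_getElem _ _ h1 h1len
          have hpf : PySem.List.pyGetD (nums.map (fun x => decide (0 ≤ x))) (mid - 1) false
              = decide (0 ≤ nums[(mid-1).toNat]) := by
            rw [PySem.List.pyGetD_eq_getElem _ _ h1 (by simpa using h1len)]
            simp
          rw [hp, hpf]
          have ht : (mid - 1).toNat = mid.toNat - 1 := by omega
          by_cases hpv : nums[(mid-1).toNat] < 0
          · rw [if_pos ⟨hvp, Or.inl ⟨h1, hpv⟩⟩, if_pos (by simpa using hvp),
              if_pos (Or.inr (by have hpv' : nums[mid.toNat - 1] < 0 := by simpa [ht] using hpv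
                                 simp [hpv']))]
          · rw [if_neg (by rintro ⟨-, ⟨-, h⟩ | h⟩; exacts [hpv h, by omega]),
              if_pos hvp, if_pos (by simpa using hvp),
              if_neg (by have h' : (0:Int) ≤ nums[mid.toNat - 1] := by simpa [ht] using not_lt.mp hpv
                         simp [hz, h'])]
            exact ih ((mid - 1 + 1 - l).toNat) (by omega) l (mid - 1) rfl hl (by omega)
      · rw [if_neg (fun h => hvp h.1), if_neg hvp, if_neg (by simpa using hvp)]
        exact ih ((r + 1 - (mid + 1)).toNat) (by omega) (mid + 1) r rfl (by omega) hr
    · simp [hlr, not_le.mp hlr]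

-- ===== VERDICT (by name: the statement is the Claim_ definition above) =====
theorem findSeprate_spec : Claim_equal_findSeprate := by
  unfold Claim_equal_findSeprate
  intro nums _
  unfold Spec_findSeprate findSeprate findSeprate_alt
  simp only [List.length_map]
  exact go_eq_search nums _ 0 ((nums.length : Int) - 1) rfl le_rfl (by omega)
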